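-- pv_equiv track=rewrite | github.com/uctb/One4All-ST | UCTB/utils/utils_ArbFlow.py | get_scale_comb
-- ===== SOURCE A (Python) =====
-- def get_scale_comb(paths):
--     tmp_paths = list(map(lambda x:set(x),paths))
--     scale_comb = set()
--     for tmp in tmp_paths:
--         scale_comb = scale_comb.union(tmp)
--     scale_comb = list(scale_comb)
--     scale_comb.sort()
--     return scale_comb
-- ===== SOURCE B (Python) =====
-- def _merge_union(a, b):
--     # merge two strictly increasing lists, keeping each value once
--     out = []
--     i = j = 0
--     while i < len(a) and j < len(b):
--         if a[i] < b[j]: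
--             out.append(a[i]); i += 1
--         elif b[j] < a[i]:
--             out.append(b[j]); j += 1
--         else:
--             out.append(a[i]); i += 1; j += 1
--     out.extend(a[i:])
--     out.extend(b[j:])
--     return out
--
-- def get_scale_comb(paths):
--     # bottom-up mergesort whose merge step is a duplicate-removing union:
--     # start from one-element runs, repeatedly merge-union adjacent runs
--     runs = [[x] for p in paths for x in p]
--     while len(runs) > 1:
--         merged = []
--         for i in range(0, len(runs) - 1, 2):
--             merged.append(_merge_union(runs[i], runs[i + 1]))
--         if len(runs) % 2:
--             merged.append(runs[-1])
--         runs = merged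
--     return runs[0] if runs else []
-- ===== Notes on version B (the rewrite author's own statement) =====
-- stated objective: alternative
-- what changed: No set and no sort call: B runs a bottom-up mergesort over one-element runs whose merge step is a duplicate-removing union of two strictly increasing runs, so the sorted distinct result is produced by repeated merge-union passes.
import Mathlib
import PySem

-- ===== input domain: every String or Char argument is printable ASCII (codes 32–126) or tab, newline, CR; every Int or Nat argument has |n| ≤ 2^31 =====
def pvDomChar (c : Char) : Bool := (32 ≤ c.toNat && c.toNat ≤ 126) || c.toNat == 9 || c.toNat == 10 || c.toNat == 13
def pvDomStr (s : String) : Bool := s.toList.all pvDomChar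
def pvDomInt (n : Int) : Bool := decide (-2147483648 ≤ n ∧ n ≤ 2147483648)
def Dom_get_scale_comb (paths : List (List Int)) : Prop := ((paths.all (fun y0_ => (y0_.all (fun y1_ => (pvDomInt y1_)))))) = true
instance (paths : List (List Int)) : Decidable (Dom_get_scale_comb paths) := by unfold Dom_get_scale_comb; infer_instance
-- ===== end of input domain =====

-- B uses no set and no sort call: a bottom-up mergesort over one-element runs whose merge step is a duplicate-removing union (alternative algorithm, same result).


-- ===== PORT A =====
def get_scale_comb (paths : List (List Int)) : List Int :=
  let tmp_paths := paths.map (fun x => PySem.Set.ofList x)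
  let scale_comb := tmp_paths.foldl (fun acc tmp => PySem.Set.union acc tmp) PySem.Set.empty
  PySem.List.sorted scale_comb (fun x => x) false

-- ===== PORT B =====
-- exact port of Source B's _merge_union: the index-based while loop over two lists
-- is transcribed as recursion on the two fronts, with the same branch order
def pvMergeUnion : List Int → List Int → List Int
  | [], b => b
  | a, [] => a
  | x :: a, y :: b =>
      if x < y then x :: pvMergeUnion a (y :: b)
      else if y < x then y :: pvMergeUnion (x :: a) b
      else x :: pvMergeUnion a b

-- one pass of Source B's for-loop: merge adjacent runs, keep a trailing odd run
def pvMergePass : List (List Int) → List (List Int)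
  | a :: b :: rest => pvMergeUnion a b :: pvMergePass rest
  | l => l

theorem pvMergePass_length_le (l : List (List Int)) : (pvMergePass l).length ≤ l.length := by
  induction l using pvMergePass.induct with
  | case1 a b rest ih => simp [pvMergePass]; omega
  | case2 l h => cases l with
    | nil => simp [pvMergePass]
    | cons a t => cases t with
      | nil => simp [pvMergePass]
      | cons b r => exact absurd rfl (h a b r)

-- Source B's while loop: repeat passes until at most one run remains
def pvMergeAll (runs : List (List Int)) : List Int :=
  match runs with
  | [] => []
  | [r] => r
  | a :: b :: rest => pvMergeAll (pvMergeUnion a b :: pvMergePass rest)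
termination_by runs.length
decreasing_by
  simpa using Nat.lt_succ_of_le (Nat.succ_le_succ (pvMergePass_length_le rest))

def get_scale_comb_alt (paths : List (List Int)) : List Int :=
  pvMergeAll (paths.flatMap (fun p => p.map (fun x => [x])))

-- ===== PRECONDITION & SPEC =====
def Spec_get_scale_comb (paths : List (List Int)) (out : List Int) : Prop := out = get_scale_comb_alt paths
instance (paths : List (List Int)) (out : List Int) : Decidable (Spec_get_scale_comb paths out) := by unfold Spec_get_scale_comb; infer_instance

-- ===== CLAIM (what is proved, stated in full; the proofs are below) =====
def Claim_equal_get_scale_comb : Prop := ∀ (paths : List (List Int)), Dom_get_scale_comb paths → Spec_get_scale_comb paths (get_scale_comb paths)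

-- ===== LEMMAS AND PROOFS =====

theorem pv_mem_mergeUnion (a b : List Int) (y : Int) :
    y ∈ pvMergeUnion a b ↔ y ∈ a ∨ y ∈ b := by
  induction a, b using pvMergeUnion.induct with
  | case1 b => simp [pvMergeUnion]
  | case2 a h => cases a with
    | nil => simp [pvMergeUnion]
    | cons x t => simp [pvMergeUnion]
  | case3 x a y' b h ih => simp only [pvMergeUnion, if_pos h, List.mem_cons, ih]; tauto
  | case4 x a y' b h1 h2 ih => simp only [pvMergeUnion, if_neg h1, if_pos h2, List.mem_cons, ih]; tauto
  | case5 x a y' b h1 h2 ih =>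
      have hxy : x = y' := by omega
      subst hxy
      simp only [pvMergeUnion, if_neg h1, List.mem_cons, ih]; tauto

theorem pv_pairwise_mergeUnion (a b : List Int)
    (ha : a.Pairwise (· < ·)) (hb : b.Pairwise (· < ·)) :
    (pvMergeUnion a b).Pairwise (· < ·) := by
  induction a, b using pvMergeUnion.induct with
  | case1 b => simpa [pvMergeUnion] using hb
  | case2 a h => cases a with
    | nil => simp [pvMergeUnion]
    | cons x t => simpa [pvMergeUnion] using ha
  | case3 x a y' b h ih =>
      obtain ⟨hx, ha'⟩ := List.pairwise_cons.mp ha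
      rw [pvMergeUnion, if_pos h, List.pairwise_cons]
      refine ⟨fun w hw => ?_, ih ha' hb⟩
      rcases (pv_mem_mergeUnion a (y' :: b) w).mp hw with hw | hw
      · exact hx w hw
      · rcases List.mem_cons.mp hw with rfl | hw
        · exact h
        · have := (List.pairwise_cons.mp hb).1 w hw; omega
  | case4 x a y' b h1 h2 ih =>
      obtain ⟨hy, hb'⟩ := List.pairwise_cons.mp hb
      rw [pvMergeUnion, if_neg h1, if_pos h2, List.pairwise_cons]
      refine ⟨fun w hw => ?_, ih ha hb'⟩
      rcases (pv_mem_mergeUnion (x :: a) b w).mp hw with hw | hw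
      · rcases List.mem_cons.mp hw with rfl | hw
        · exact h2
        · have := (List.pairwise_cons.mp ha).1 w hw; omega
      · exact hy w hw
  | case5 x a y' b h1 h2 ih =>
      have hxy : x = y' := by omega
      subst hxy
      obtain ⟨hx, ha'⟩ := List.pairwise_cons.mp ha
      obtain ⟨hy, hb'⟩ := List.pairwise_cons.mp hb
      rw [pvMergeUnion, if_neg h1, if_neg h2, List.pairwise_cons]
      refine ⟨fun w hw => ?_, ih ha' hb'⟩
      rcases (pv_mem_mergeUnion a b w).mp hw with hw | hw
      · exact hx w hw
      · exact hy w hw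

theorem pv_mergePass_sorted (l : List (List Int)) (h : ∀ r ∈ l, r.Pairwise (· < ·)) :
    ∀ r ∈ pvMergePass l, r.Pairwise (· < ·) := by
  induction l using pvMergePass.induct with
  | case1 a b rest ih =>
      intro r hr
      rw [pvMergePass] at hr
      rcases List.mem_cons.mp hr with rfl | hr
      · exact pv_pairwise_mergeUnion a b (h a (by simp)) (h b (by simp))
      · exact ih (fun r hr => h r (by simp [hr])) r hr
  | case2 l hl =>
      intro r hr
      cases l with
      | nil => cases hr
      | cons a t => cases t with
        | nil => exact h r (by simpa [pvMergePass] using hr)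
        | cons b rest => exact absurd rfl (hl a b rest)

theorem pv_mergePass_mem (l : List (List Int)) (y : Int) :
    (∃ r ∈ pvMergePass l, y ∈ r) ↔ (∃ r ∈ l, y ∈ r) := by
  induction l using pvMergePass.induct with
  | case1 a b rest ih =>
      simp only [pvMergePass, List.mem_cons]
      constructor
      · rintro ⟨r, rfl | hr, hy⟩
        · rcases (pv_mem_mergeUnion a b y).mp hy with hy | hy
          · exact ⟨a, Or.inl rfl, hy⟩
          · exact ⟨b, Or.inr (Or.inl rfl), hy⟩
        · obtain ⟨r', hr', hy'⟩ := ih.mp ⟨r, hr, hy⟩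
          exact ⟨r', Or.inr (Or.inr hr'), hy'⟩
      · rintro ⟨r, rfl | rfl | hr, hy⟩
        · exact ⟨pvMergeUnion r b, Or.inl rfl, (pv_mem_mergeUnion r b y).mpr (Or.inl hy)⟩
        · exact ⟨pvMergeUnion a r, Or.inl rfl, (pv_mem_mergeUnion a r y).mpr (Or.inr hy)⟩
        · obtain ⟨r', hr', hy'⟩ := ih.mpr ⟨r, hr, hy⟩
          exact ⟨r', Or.inr hr', hy'⟩
  | case2 l hl =>
      cases l with
      | nil => simp [pvMergePass]
      | cons a t => cases t with
        | nil => simp [pvMergePass]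
        | cons b rest => exact absurd rfl (hl a b rest)

theorem pv_mergeAll (runs : List (List Int)) (h : ∀ r ∈ runs, r.Pairwise (· < ·)) :
    (pvMergeAll runs).Pairwise (· < ·) ∧
    ∀ y, (y ∈ pvMergeAll runs ↔ ∃ r ∈ runs, y ∈ r) := by
  induction runs using pvMergeAll.induct with
  | case1 => simp [pvMergeAll]
  | case2 r => simpa [pvMergeAll] using h r (by simp)
  | case3 a b rest ih =>
      have hpass : ∀ r ∈ pvMergeUnion a b :: pvMergePass rest, r.Pairwise (· < ·) := by
        intro r hr
        rcases List.mem_cons.mp hr with rfl | hr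
        · exact pv_pairwise_mergeUnion a b (h a (by simp)) (h b (by simp))
        · exact pv_mergePass_sorted rest (fun r hr => h r (by simp [hr])) r hr
      obtain ⟨h1, h2⟩ := ih hpass
      rw [pvMergeAll]
      refine ⟨h1, fun y => ?_⟩
      rw [h2 y]
      simp only [List.mem_cons]
      constructor
      · rintro ⟨r, rfl | hr, hy⟩
        · rcases (pv_mem_mergeUnion a b y).mp hy with hy | hy
          · exact ⟨a, Or.inl rfl, hy⟩
          · exact ⟨b, Or.inr (Or.inl rfl), hy⟩
        · obtain ⟨r', hr', hy'⟩ := (pv_mergePass_mem rest y).mp ⟨r, hr, hy⟩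
          exact ⟨r', Or.inr (Or.inr hr'), hy'⟩
      · rintro ⟨r, rfl | rfl | hr, hy⟩
        · exact ⟨pvMergeUnion r b, Or.inl rfl, (pv_mem_mergeUnion r b y).mpr (Or.inl hy)⟩
        · exact ⟨pvMergeUnion a r, Or.inl rfl, (pv_mem_mergeUnion a r y).mpr (Or.inr hy)⟩
        · obtain ⟨r', hr', hy'⟩ := (pv_mergePass_mem rest y).mpr ⟨r, hr, hy⟩
          exact ⟨r', Or.inr hr', hy'⟩

-- membership in A's union-fold set
theorem pv_union_fold_mem (paths : List (List Int)) : ∀ (acc : List Int),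
    (∀ y, y ∈ (paths.map (fun x => PySem.Set.ofList x)).foldl (fun acc tmp => PySem.Set.union acc tmp) acc ↔
      y ∈ acc ∨ ∃ p ∈ paths, y ∈ p) := by
  induction paths with
  | nil => intro acc y; simp
  | cons p rest ih =>
    intro acc y
    simp only [List.map_cons, List.foldl_cons]
    rw [ih (PySem.Set.union acc (PySem.Set.ofList p)) y]
    rw [PySem.Set.mem_union, PySem.Set.mem_ofList]
    simp only [List.mem_cons]
    constructor
    · rintro ((h | h) | ⟨q, hq, hy⟩)
      · exact Or.inl h
      · exact Or.inr ⟨p, Or.inl rfl, h⟩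
      · exact Or.inr ⟨q, Or.inr hq, hy⟩
    · rintro (h | ⟨q, hq | hq, hy⟩)
      · exact Or.inl (Or.inl h)
      · exact Or.inl (Or.inr (hq ▸ hy))
      · exact Or.inr ⟨q, hq, hy⟩

-- A's union-fold set has no duplicates
theorem pv_union_fold_nodup (paths : List (List Int)) : ∀ (acc : List Int), acc.Nodup →
    ((paths.map (fun x => PySem.Set.ofList x)).foldl (fun acc tmp => PySem.Set.union acc tmp) acc).Nodup := by
  induction paths with
  | nil => intro acc h; simpa using h
  | cons p rest ih =>
    intro acc h
    simp only [List.map_cons, List.foldl_cons]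
    exact ih _ (PySem.Set.nodup_union _ _ h)

-- ===== VERDICT (by name: the statement is the Claim_ definition above) =====
theorem get_scale_comb_spec : Claim_equal_get_scale_comb := by
  intro paths _
  unfold Spec_get_scale_comb get_scale_comb get_scale_comb_alt
  simp only []
  set S := (paths.map (fun x => PySem.Set.ofList x)).foldl (fun acc tmp => PySem.Set.union acc tmp) PySem.Set.empty with hS
  set runs := paths.flatMap (fun p => p.map (fun x => [x])) with hruns
  have hrsorted : ∀ r ∈ runs, r.Pairwise (· < ·) := by
    intro r hr
    rw [hruns, List.mem_flatMap] at hr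
    obtain ⟨p, _, hr⟩ := hr
    obtain ⟨x, _, rfl⟩ := List.mem_map.mp hr
    simp
  obtain ⟨hRpw, hRmem⟩ := pv_mergeAll runs hrsorted
  have hRmem' : ∀ y, y ∈ pvMergeAll runs ↔ y ∈ S := by
    intro y
    rw [hRmem y, pv_union_fold_mem paths PySem.Set.empty y]
    simp [hruns, PySem.Set.empty, List.mem_flatMap]
  have hSnodup : S.Nodup := pv_union_fold_nodup paths PySem.Set.empty List.nodup_nil
  have hRnodup : (pvMergeAll runs).Nodup := hRpw.imp (fun h => Int.ne_of_lt h)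
  have hperm : (pvMergeAll runs).Perm S := (List.perm_ext_iff_of_nodup hRnodup hSnodup).mpr hRmem'
  exact PySem.List.sorted_eq_of_perm_of_pairwise_lt S (pvMergeAll runs) (fun x => x) hperm (by simpa using hRpw)
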